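-- pv_equiv track=rewrite | github.com/ALOHAALOHAALOJHA/FARFAN_MCDPP | src/farfan_pipeline/phases/Phase_08/phase8_26_01_dimensional_bifurcator_adapter.py | _get_cross_pollination_pas
-- ===== SOURCE A (Python) =====
-- def _get_cross_pollination_pas(pa_id: str) -> list[str]:
--     """Get PAs that could benefit from cross-pollination"""
--     # Based on cluster membership
--     clusters = {
--         "CL01": ["PA02", "PA05", "PA07"],  # Seguridad y Paz
--         "CL02": ["PA01", "PA06", "PA08"],  # Grupos Poblacionales
--         "CL03": ["PA03", "PA04"],          # Territorio-Ambiente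
--         "CL04": ["PA09", "PA10"]           # DESC y Crisis
--     }
--
--     for cluster_pas in clusters.values():
--         if pa_id in cluster_pas:
--             return [p for p in cluster_pas if p != pa_id]
--
--     return []
-- ===== SOURCE B (Python) =====
-- # Precomputed flat table: each PA id -> the other members of its cluster
-- # (the reverse index of the constant cluster table, written out directly).
-- _CLUSTER_MATES = {
--     "PA02": ["PA05", "PA07"], "PA05": ["PA02", "PA07"], "PA07": ["PA02", "PA05"],
--     "PA01": ["PA06", "PA08"], "PA06": ["PA01", "PA08"], "PA08": ["PA01", "PA06"],
--     "PA03": ["PA04"], "PA04": ["PA03"],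
--     "PA09": ["PA10"], "PA10": ["PA09"],
-- }
--
-- def _get_cross_pollination_pas(pa_id: str) -> list[str]:
--     """Get PAs that could benefit from cross-pollination"""
--     return list(_CLUSTER_MATES.get(pa_id, []))
-- ===== Notes on version B (the rewrite author's own statement) =====
-- stated objective: simpler
-- what changed: Replaces the query-time scan over cluster lists (membership test, then a filter pass) with a precomputed flat mates table (the reverse index of the constant cluster table written out as a literal), so the body is a single dict lookup with a [] default and no loop or filter at all.
import Mathlib
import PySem

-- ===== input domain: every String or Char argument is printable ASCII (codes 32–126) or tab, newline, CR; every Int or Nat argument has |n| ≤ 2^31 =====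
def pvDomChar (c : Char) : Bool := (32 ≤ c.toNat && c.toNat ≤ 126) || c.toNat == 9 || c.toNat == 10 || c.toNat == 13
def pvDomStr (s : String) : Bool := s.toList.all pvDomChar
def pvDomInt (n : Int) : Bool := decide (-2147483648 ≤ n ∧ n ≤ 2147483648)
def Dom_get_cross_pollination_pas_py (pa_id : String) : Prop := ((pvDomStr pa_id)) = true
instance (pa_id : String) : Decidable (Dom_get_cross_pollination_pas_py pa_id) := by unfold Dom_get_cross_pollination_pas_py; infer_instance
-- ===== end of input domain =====

-- B replaces A's query-time scan over cluster lists with a precomputed flat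
-- mates table (the reverse index written out as a literal) and one lookup.


-- ===== PORT A =====
-- A: scan the cluster lists in order; on the first cluster containing pa_id,
-- return the other members; otherwise [].
def pvClustersA : PySem.Dict String (List String) :=
  PySem.Dict.ofList
    [("CL01", ["PA02", "PA05", "PA07"]),
     ("CL02", ["PA01", "PA06", "PA08"]),
     ("CL03", ["PA03", "PA04"]),
     ("CL04", ["PA09", "PA10"])]

def pvScanA (vals : List (List String)) (pa_id : String) : List String :=
  match vals with
  | [] => []
  | cluster_pas :: rest =>
      if pa_id ∈ cluster_pas then cluster_pas.filter (fun p => p ≠ pa_id)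
      else pvScanA rest pa_id

def get_cross_pollination_pas_py (pa_id : String) : List String :=
  pvScanA pvClustersA.values pa_id

-- ===== PORT B =====
-- B: a precomputed flat mates table, one lookup with [] default.
def pvClusterMates : PySem.Dict String (List String) :=
  PySem.Dict.ofList
    [("PA02", ["PA05", "PA07"]), ("PA05", ["PA02", "PA07"]), ("PA07", ["PA02", "PA05"]),
     ("PA01", ["PA06", "PA08"]), ("PA06", ["PA01", "PA08"]), ("PA08", ["PA01", "PA06"]),
     ("PA03", ["PA04"]), ("PA04", ["PA03"]),
     ("PA09", ["PA10"]), ("PA10", ["PA09"])]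

def get_cross_pollination_pas_py_alt (pa_id : String) : List String :=
  pvClusterMates.getD pa_id []

-- ===== PRECONDITION & SPEC =====
def Spec_get_cross_pollination_pas_py (pa_id : String) (out : List String) : Prop := out = get_cross_pollination_pas_py_alt pa_id
instance (pa_id : String) (out : List String) : Decidable (Spec_get_cross_pollination_pas_py pa_id out) := by unfold Spec_get_cross_pollination_pas_py; infer_instance

-- ===== CLAIM =====
def Claim_equal_get_cross_pollination_pas_py : Prop := ∀ (pa_id : String), Dom_get_cross_pollination_pas_py pa_id → Spec_get_cross_pollination_pas_py pa_id (get_cross_pollination_pas_py pa_id)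

-- ===== LEMMAS AND PROOFS =====
-- the flat mates table, normalised to a plain literal
theorem pvMates_eq : pvClusterMates = PySem.Dict.mk
    [("PA02", ["PA05", "PA07"]), ("PA05", ["PA02", "PA07"]), ("PA07", ["PA02", "PA05"]),
     ("PA01", ["PA06", "PA08"]), ("PA06", ["PA01", "PA08"]), ("PA08", ["PA01", "PA06"]),
     ("PA03", ["PA04"]), ("PA04", ["PA03"]),
     ("PA09", ["PA10"]), ("PA10", ["PA09"])] := by decide

theorem pv_agree (pa_id : String) :
    get_cross_pollination_pas_py pa_id = get_cross_pollination_pas_py_alt pa_id := by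
  by_cases h1 : pa_id = "PA01"; · subst h1; decide
  by_cases h2 : pa_id = "PA02"; · subst h2; decide
  by_cases h3 : pa_id = "PA03"; · subst h3; decide
  by_cases h4 : pa_id = "PA04"; · subst h4; decide
  by_cases h5 : pa_id = "PA05"; · subst h5; decide
  by_cases h6 : pa_id = "PA06"; · subst h6; decide
  by_cases h7 : pa_id = "PA07"; · subst h7; decide
  by_cases h8 : pa_id = "PA08"; · subst h8; decide
  by_cases h9 : pa_id = "PA09"; · subst h9; decide
  by_cases h10 : pa_id = "PA10"; · subst h10; decide
  -- pa_id is none of the known ids: both programs return []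
  simp only [get_cross_pollination_pas_py, get_cross_pollination_pas_py_alt, pvMates_eq]
  have hv : pvClustersA.values =
      [["PA02", "PA05", "PA07"], ["PA01", "PA06", "PA08"], ["PA03", "PA04"], ["PA09", "PA10"]] := by
    decide
  rw [hv]
  simp [pvScanA, PySem.Dict.getD, PySem.Dict.get?,
    h1, h2, h3, h4, h5, h6, h7, h8, h9, h10,
    Ne.symm h1, Ne.symm h2, Ne.symm h3, Ne.symm h4, Ne.symm h5, Ne.symm h6, Ne.symm h7,
    Ne.symm h8, Ne.symm h9, Ne.symm h10]

-- ===== VERDICT =====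
theorem get_cross_pollination_pas_py_spec : Claim_equal_get_cross_pollination_pas_py := by
  intro pa_id _
  unfold Spec_get_cross_pollination_pas_py
  exact pv_agree pa_id
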